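-- pv_equiv track=rewrite | github.com/juampiludu/FAMAF | Segundo Año/1C/AyED2/Práctico/Práctico3.1/practico31.py | save_people
-- ===== SOURCE A (Python) =====
-- def save_people(people : list(), ox_t : int(), rescue_t : int()):
--     people_aux = people.copy()
--     min_ox_p = tuple()
--     total_rescue_p = 0
--     while len(people_aux) > 0:
--         min_ox_p = get_min_ox_p(people_aux)
--         ox_t -= rescue_t * min_ox_p
--         if ox_t >= 0:
--             total_rescue_p += 1
--         people_aux.remove(min_ox_p)
--     return total_rescue_p
--
-- def get_min_ox_p(people : list()):
--     p = people[0]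
--     for i in range(1, len(people)):
--         p = people[i] if people[i] < p else p
--     return p
-- ===== SOURCE B (Python) =====
-- def save_people(people, ox_t, rescue_t):
--     total = 0
--     for p in sorted(people):
--         ox_t -= rescue_t * p
--         if ox_t >= 0:
--             total += 1
--     return total
-- ===== Notes on version B (the rewrite author's own statement) =====
-- stated objective: faster
-- what changed: Replaces the quadratic repeated linear-minimum-plus-remove loop by one library sort followed by a single running-oxygen scan.
import Mathlib
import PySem

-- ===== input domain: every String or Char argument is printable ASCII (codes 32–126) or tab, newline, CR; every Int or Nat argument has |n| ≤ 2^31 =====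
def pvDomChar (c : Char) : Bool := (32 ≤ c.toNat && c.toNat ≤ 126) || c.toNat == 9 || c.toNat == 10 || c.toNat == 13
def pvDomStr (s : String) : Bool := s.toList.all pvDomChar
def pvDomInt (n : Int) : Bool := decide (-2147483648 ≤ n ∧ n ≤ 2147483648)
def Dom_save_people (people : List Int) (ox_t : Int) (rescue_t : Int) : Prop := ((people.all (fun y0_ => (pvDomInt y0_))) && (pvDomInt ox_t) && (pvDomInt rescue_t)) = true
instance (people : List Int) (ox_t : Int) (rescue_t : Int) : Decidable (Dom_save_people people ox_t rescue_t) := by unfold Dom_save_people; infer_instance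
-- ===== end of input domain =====

-- B replaces A's quadratic find-min-and-remove loop with one sort and a single running-oxygen scan (faster, asymptotic).


-- ===== PORT A =====
-- get_min_ox_p: p = people[0]; for each later element, p = x if x < p else p.
-- (A only calls it on a non-empty list; the [] branch is unreachable there.)
def get_min_ox_p (people : List Int) : Int :=
  match people with
  | [] => 0
  | p0 :: rest => rest.foldl (fun p x => if x < p then x else p) p0

theorem remove?_some_length {xs : List Int} {v : Int} {r : List Int}
    (h : PySem.List.remove? xs v = some r) : r.length < xs.length := by
  have hv : v ∈ xs := by
    by_contra hnot
    rw [(PySem.List.remove?_eq_none_iff xs v).mpr hnot] at h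
    simp at h
  rw [PySem.List.remove?_eq_some_erase xs v hv] at h
  cases h
  have := List.length_pos_of_mem hv
  rw [List.length_erase_of_mem hv]
  omega

-- while len(people_aux) > 0: take min, subtract, count if ox >= 0, remove the min
def save_people_loop (people_aux : List Int) (ox_t : Int) (rescue_t : Int) (total : Int) : Int :=
  if people_aux.length > 0 then
    let min_ox_p := get_min_ox_p people_aux
    let ox' := ox_t - rescue_t * min_ox_p
    let total' := if ox' ≥ 0 then total + 1 else total
    match h : PySem.List.remove? people_aux min_ox_p with
    | some rest => save_people_loop rest ox' rescue_t total'
    | none => total'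
  else total
termination_by people_aux.length
decreasing_by exact remove?_some_length h

def save_people (people : List Int) (ox_t : Int) (rescue_t : Int) : Int :=
  save_people_loop people ox_t rescue_t 0

-- ===== PORT B =====
-- total = 0; for p in sorted(people): ox_t -= rescue_t * p; if ox_t >= 0: total += 1
def save_people_alt (people : List Int) (ox_t : Int) (rescue_t : Int) : Int :=
  ((PySem.List.sorted people (fun x => x) false).foldl
    (fun acc p =>
      (if acc.2 - rescue_t * p ≥ 0 then acc.1 + 1 else acc.1, acc.2 - rescue_t * p))
    ((0 : Int), ox_t)).1

-- ===== PRECONDITION & SPEC =====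
def Spec_save_people (people : List Int) (ox_t : Int) (rescue_t : Int) (out : Int) : Prop := out = save_people_alt people ox_t rescue_t
instance (people : List Int) (ox_t : Int) (rescue_t : Int) (out : Int) : Decidable (Spec_save_people people ox_t rescue_t out) := by unfold Spec_save_people; infer_instance

-- ===== CLAIM (what is proved, stated in full; the proofs are below) =====
def Claim_equal_save_people : Prop := ∀ (people : List Int) (ox_t : Int) (rescue_t : Int), Dom_save_people people ox_t rescue_t → Spec_save_people people ox_t rescue_t (save_people people ox_t rescue_t)

-- ===== LEMMAS AND PROOFS =====

theorem get_min_mem (p0 : Int) (rest : List Int) : get_min_ox_p (p0 :: rest) ∈ p0 :: rest := by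
  simp only [get_min_ox_p]
  have hcong : rest.foldl (fun p x => if x < p then x else p) p0 = rest.foldl min p0 := by
    apply PySem.List.foldl_congr_mem
    intro acc x _
    rcases lt_or_ge x acc with h | h
    · simp [h, min_eq_right h.le]
    · simp [not_lt.mpr h, min_eq_left h]
  rw [hcong]
  rcases PySem.List.foldl_min_mem rest p0 with h | h
  · rw [h]; exact List.mem_cons_self
  · exact List.mem_cons_of_mem _ h

theorem get_min_le (p0 : Int) (rest : List Int) (y : Int) (hy : y ∈ p0 :: rest) :
    get_min_ox_p (p0 :: rest) ≤ y := by
  simp only [get_min_ox_p]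
  have hcong : rest.foldl (fun p x => if x < p then x else p) p0 = rest.foldl min p0 := by
    apply PySem.List.foldl_congr_mem
    intro acc x _
    rcases lt_or_ge x acc with h | h
    · simp [h, min_eq_right h.le]
    · simp [not_lt.mpr h, min_eq_left h]
  rw [hcong]
  rcases List.mem_cons.mp hy with rfl | hy
  · exact (PySem.List.foldl_min_le rest y).1
  · exact (PySem.List.foldl_min_le rest p0).2 y hy

theorem sorted_cons_min (l : List Int) (hl : l ≠ []) :
    PySem.List.sorted l (fun x => x) false
      = get_min_ox_p l :: PySem.List.sorted (l.erase (get_min_ox_p l)) (fun x => x) false := by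
  obtain ⟨p0, rest, rfl⟩ := List.exists_cons_of_ne_nil hl
  set m := get_min_ox_p (p0 :: rest) with hm
  have hmem : m ∈ p0 :: rest := get_min_mem p0 rest
  apply PySem.List.sorted_id_eq_of_perm_of_pairwise
  · exact ((PySem.List.sorted_perm _ _ _).cons m).trans (List.perm_cons_erase hmem).symm
  · refine List.pairwise_cons.mpr ⟨?_, ?_⟩
    · intro b hb
      have hb' : b ∈ (p0 :: rest).erase m := (PySem.List.mem_sorted _ _ _ _).mp hb
      exact get_min_le p0 rest b (List.erase_subset hb')
    · exact PySem.List.sorted_pairwise _ _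

theorem loop_eq_fold (n : Nat) : ∀ (l : List Int), l.length = n → ∀ (o r t : Int),
    save_people_loop l o r t
      = ((PySem.List.sorted l (fun x => x) false).foldl
          (fun acc p =>
            (if acc.2 - r * p ≥ 0 then acc.1 + 1 else acc.1, acc.2 - r * p))
          (t, o)).1 := by
  induction n using Nat.strong_induction_on with
  | _ n ih =>
    intro l hlen o r t
    match l with
    | [] =>
      rw [save_people_loop]
      simp [PySem.List.sorted]
    | p0 :: rest =>
      rw [save_people_loop]
      have hnil : (p0 :: rest : List Int) ≠ [] := by simp
      set m := get_min_ox_p (p0 :: rest) with hm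
      have hmem : m ∈ p0 :: rest := get_min_mem p0 rest
      have hrem : PySem.List.remove? (p0 :: rest) m = some ((p0 :: rest).erase m) :=
        PySem.List.remove?_eq_some_erase _ m hmem
      have hlt : ((p0 :: rest).erase m).length < n := by
        rw [← hlen, List.length_erase_of_mem hmem]
        have := List.length_pos_of_mem hmem
        omega
      simp only [List.length_cons, Nat.succ_pos, if_pos]
      rw [sorted_cons_min (p0 :: rest) hnil, ← hm, List.foldl_cons]
      split
      · next rest1 heq =>
          rw [hrem] at heq
          cases heq
          rw [ih _ hlt _ rfl]
      · next heq =>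
          rw [hrem] at heq
          cases heq

-- ===== VERDICT (by name: the statement is the Claim_ definition above) =====
theorem save_people_spec : Claim_equal_save_people := by
  intro people ox_t rescue_t _
  unfold Spec_save_people save_people save_people_alt
  exact loop_eq_fold people.length people rfl ox_t rescue_t 0
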